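-- pv_equiv track=rewrite | github.com/thevitorhideki/academia-python | lists/encontra_maximp.py | encontra_maximo
-- ===== SOURCE A (Python) =====
-- def encontra_maximo(matriz):
--     biggest = 0
--
--     for i in range(len(matriz)):
--         for j in matriz[i]:
--             j = abs(j)
--             if j > biggest:
--                 biggest = j
--
--     return biggest
-- ===== SOURCE B (Python) =====
-- def encontra_maximo(matriz):
--     vals = [x for row in matriz for x in row]
--     if not vals:
--         return 0
--     return max(max(vals), -min(vals), 0)
-- ===== Notes on version B (the rewrite author's own statement) =====
-- stated objective: alternative
-- what changed: B flattens the matrix once and tracks the two signed extremes (max and min), returning max(max_val, -min_val, 0), instead of A's running maximum of absolute values.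
import Mathlib
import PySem

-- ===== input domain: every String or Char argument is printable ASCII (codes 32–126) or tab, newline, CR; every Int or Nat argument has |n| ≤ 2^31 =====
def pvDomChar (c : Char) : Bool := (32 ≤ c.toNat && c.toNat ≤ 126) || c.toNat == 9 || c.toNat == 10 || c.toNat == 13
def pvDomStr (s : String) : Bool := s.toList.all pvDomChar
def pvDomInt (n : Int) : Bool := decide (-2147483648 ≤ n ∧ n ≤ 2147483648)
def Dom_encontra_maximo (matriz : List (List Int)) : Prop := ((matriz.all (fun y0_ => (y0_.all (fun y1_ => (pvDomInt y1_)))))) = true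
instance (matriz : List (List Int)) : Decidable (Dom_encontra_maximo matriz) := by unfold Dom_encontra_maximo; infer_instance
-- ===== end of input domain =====

-- B: tracks the two signed extremes over the flattened matrix instead of a running max of absolute values (alternative decomposition, same O(n) cost).
-- ===== PORT A =====
def encontra_maximo (matriz : List (List Int)) : Int :=
  matriz.foldl (fun biggest row =>
    row.foldl (fun biggest j =>
      let a := |j|
      if a > biggest then a else biggest) biggest) 0

-- ===== PORT B =====
def encontra_maximo_alt (matriz : List (List Int)) : Int :=
  match matriz.flatten with
  | [] => 0
  | v :: vs => max (max (vs.foldl max v) (-(vs.foldl min v))) 0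

-- ===== PRECONDITION & SPEC =====
def Spec_encontra_maximo (matriz : List (List Int)) (out : Int) : Prop := out = encontra_maximo_alt matriz
instance (matriz : List (List Int)) (out : Int) : Decidable (Spec_encontra_maximo matriz out) := by unfold Spec_encontra_maximo; infer_instance

-- ===== CLAIM (what is proved, stated in full; the proofs are below) =====
def Claim_equal_encontra_maximo : Prop := ∀ (matriz : List (List Int)), Dom_encontra_maximo matriz → Spec_encontra_maximo matriz (encontra_maximo matriz)

-- ===== LEMMAS AND PROOFS =====

theorem pv_step_funext :
    (fun (biggest j : Int) => let a := |j|; if a > biggest then a else biggest)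
    = fun (x j : Int) => max x |j| := by
  funext b j
  by_cases h : |j| > b <;> simp [h, max_def] <;> omega

theorem pv_rows_eq_flatten (M : List (List Int)) :
    M.foldl (fun biggest row =>
      row.foldl (fun biggest j =>
        let a := |j|
        if a > biggest then a else biggest) biggest) 0
    = M.flatten.foldl (fun biggest j =>
        let a := |j|
        if a > biggest then a else biggest) 0 := by
  rw [List.foldl_flatten]

theorem pv_seed_max (vs : List Int) (b c : Int) :
    vs.foldl (fun x j => max x |j|) (max b c) = max b (vs.foldl (fun x j => max x |j|) c) := by
  induction vs generalizing c with
  | nil => rfl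
  | cons x xs ih => simp only [List.foldl_cons, max_assoc, ih]

theorem pv_absmax_eq_two_extremes (vs : List Int) (v : Int) :
    vs.foldl (fun x j => max x |j|) |v| = max (vs.foldl max v) (-(vs.foldl min v)) := by
  have key : ∀ (l : List Int) (b c : Int),
      l.foldl (fun x j => max x |j|) (max b (-c)) = max (l.foldl max b) (-(l.foldl min c)) := by
    intro l
    induction l with
    | nil => intro b c; rfl
    | cons x xs ih =>
      intro b c
      simp only [List.foldl_cons]
      rw [show max (max b (-c)) |x| = max (max b x) (-(min c x)) by
        rcases abs_cases x with ⟨hx,_⟩|⟨hx,_⟩ <;> rw [hx] <;> omega]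
      exact ih _ _
  have := key vs v v
  rwa [← abs_eq_max_neg] at this

-- ===== VERDICT (by name: the statement is the Claim_ definition above) =====
theorem encontra_maximo_spec : Claim_equal_encontra_maximo := by
  intro matriz _
  unfold Spec_encontra_maximo encontra_maximo encontra_maximo_alt
  rw [pv_rows_eq_flatten, pv_step_funext]
  cases h : matriz.flatten with
  | nil => simp
  | cons v vs =>
    simp only [List.foldl_cons]
    rw [show max (0 : Int) |v| = max 0 |v| from rfl, pv_seed_max, pv_absmax_eq_two_extremes]
    exact max_comm _ _
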